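-- pv_equiv track=rewrite | github.com/Verulean/Advent-of-Code | years/2024/days/aoc19.py | solve
-- ===== SOURCE A (Python) =====
-- from functools import cache
--
-- def solve(data):
--     patterns = set(data[0].split(", "))
--     designs = data[1].split()
--     @cache
--     def count(design: str):
--         if not design:
--             return 1
--         return sum(count(design.removeprefix(pattern)) for pattern in patterns if design.startswith(pattern))
--     ans1 = sum(1 for d in designs if count(d) > 0)
--     ans2 = sum(map(count, designs))
--     return ans1, ans2
-- ===== SOURCE B (Python) =====
-- def solve(data):
--     patterns = set(data[0].split(", "))
--     designs = data[1].split()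
--     ans1 = 0
--     ans2 = 0
--     for d in designs:
--         n = len(d)
--         dp = [0] * (n + 1)
--         dp[n] = 1
--         for i in range(n - 1, -1, -1):
--             dp[i] = sum(dp[i + len(p)] for p in patterns if d.startswith(p, i))
--         ways = dp[0]
--         if ways > 0:
--             ans1 += 1
--         ans2 += ways
--     return ans1, ans2
-- ===== Notes on version B (the rewrite author's own statement) =====
-- stated objective: alternative
-- what changed: A's cached top-down recursion on design suffixes is replaced by an explicit bottom-up DP table per design, built back-to-front over positions, with the two answers accumulated in a single pass over the designs.
import Mathlib
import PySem

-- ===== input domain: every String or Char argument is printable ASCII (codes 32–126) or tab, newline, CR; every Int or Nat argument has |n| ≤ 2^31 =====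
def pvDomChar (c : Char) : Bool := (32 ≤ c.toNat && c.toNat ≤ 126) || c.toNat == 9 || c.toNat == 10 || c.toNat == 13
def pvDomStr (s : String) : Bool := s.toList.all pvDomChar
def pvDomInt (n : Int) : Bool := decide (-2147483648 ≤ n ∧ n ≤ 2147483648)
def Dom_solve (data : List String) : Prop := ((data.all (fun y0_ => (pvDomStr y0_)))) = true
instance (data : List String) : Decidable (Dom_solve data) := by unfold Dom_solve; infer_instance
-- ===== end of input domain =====

-- B replaces A's memoized top-down recursion by an explicit DP table built back-to-front per design (alternative decomposition, same asymptotic cost).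

-- ===== PORT A =====
-- A's `count` is memoized recursion on the design suffix; ported as fueled structural
-- recursion (fuel = len(design)+1 suffices whenever "" ∉ patterns, which Pre_ ensures
-- for every design actually processed; memoization dropped — it does not change values).
-- `design.removeprefix(pattern)` under `startswith` is ported by hand as `d.drop p.length` (exact there).
def pvCountA (pats : List (List Char)) : Nat → List Char → Int
  | 0, _ => 0
  | f + 1, d =>
    if d.isEmpty then 1
    else ((pats.filter (fun p => PySem.Chars.startswith d p)).map
            (fun p => pvCountA pats f (d.drop p.length))).sum

def solve (data : List String) : Int × Int :=
  match PySem.List.pyGet? data 0, PySem.List.pyGet? data 1 with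
  | some l0, some l1 =>
    let patterns := PySem.Set.ofList (PySem.Chars.splitOn l0.toList (", ".toList))
    let designs := PySem.Chars.split₀ l1.toList
    let ans1 : Int := ((designs.countP (fun d => decide (0 < pvCountA patterns (d.length + 1) d))) : Int)
    let ans2 : Int := (designs.map (fun d => pvCountA patterns (d.length + 1) d)).sum
    (ans1, ans2)
  | _, _ => (0, 0)  -- IndexError in Python; excluded by Pre_solve

-- ===== PORT B =====
-- B's inner loop `for i in range(n-1,-1,-1): dp[i] = sum(dp[i+len(p)] …)` builds the dp
-- table back-to-front; ported as structural recursion on the design's char list, the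
-- accumulated list being dp[i+1..n]; `dp[i+len(p)]` with dp[i] still 0 is `(0 :: dpl)[len p]`,
-- and `d.startswith(p, i)` is startswith on the suffix at i (exact index shift).
def pvRowB (pats : List (List Char)) : List Char → List Int
  | [] => [1]
  | c :: rest =>
    let dpl := pvRowB pats rest
    (((pats.filter (fun p => PySem.Chars.startswith (c :: rest) p)).map
        (fun p => (0 :: dpl).getD p.length 0)).sum) :: dpl

def solve_alt (data : List String) : Int × Int :=
  match PySem.List.pyGet? data 0 with
  | none => (0, 0)
  | some l0 =>
  match PySem.List.pyGet? data 1 with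
  | none => (0, 0)
  | some l1 =>
    let patterns := PySem.Set.ofList (PySem.Chars.splitOn l0.toList (", ".toList))
    let designs := PySem.Chars.split₀ l1.toList
    designs.foldl
      (fun acc d =>
        let ways := (pvRowB patterns d).headI
        (acc.1 + (if 0 < ways then 1 else 0), acc.2 + ways))
      (0, 0)

-- ===== PRECONDITION & SPEC =====
-- Pre_ excludes inputs where Python A raises: fewer than two lines (IndexError on data[1]),
-- and an empty string among the patterns together with at least one design (count recurses
-- on itself forever there: RecursionError).
def Pre_solve (data : List String) : Prop :=
  2 ≤ data.length ∧
    ([] ∈ PySem.Chars.splitOn (data.getD 0 "").toList (", ".toList) → PySem.Chars.split₀ (data.getD 1 "").toList = [])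
instance (data : List String) : Decidable (Pre_solve data) := by unfold Pre_solve; infer_instance

def pvWitness_solve : List String := ["a, ab", "ab a aba"]

def Spec_solve (data : List String) (out : Int × Int) : Prop := out = solve_alt data
instance (data : List String) (out : Int × Int) : Decidable (Spec_solve data out) := by unfold Spec_solve; infer_instance

-- ===== CLAIM (what is proved, stated in full; the proofs are below) =====
def Claim_equal_solve : Prop := ∀ (data : List String), Dom_solve data → Pre_solve data → Spec_solve data (solve data)

-- ===== LEMMAS AND PROOFS =====

-- fuel irrelevance for A's count, given no empty pattern
lemma pvCountA_fuel (pats : List (List Char)) (hp : [] ∉ pats) :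
    ∀ f₁ f₂ d, d.length < f₁ → d.length < f₂ → pvCountA pats f₁ d = pvCountA pats f₂ d := by
  intro f₁
  induction f₁ with
  | zero => intro f₂ d h1 h2; omega
  | succ g ih =>
    intro f₂ d h1 h2
    match f₂ with
    | 0 => omega
    | h + 1 =>
      simp only [pvCountA]
      by_cases hd : d.isEmpty
      · simp [hd]
      · simp only [hd]
        refine congrArg List.sum ?_
        apply List.map_congr_left
        intro p hpmem
        rw [List.mem_filter] at hpmem
        obtain ⟨hpm, hsw⟩ := hpmem
        have hpre := (PySem.Chars.startswith_iff d p).mp hsw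
        have hne : p ≠ [] := fun hz => hp (hz ▸ hpm)
        have hl1 : 0 < p.length := List.length_pos_iff.mpr hne
        have hl2 : p.length ≤ d.length := hpre.length_le
        have hdl : 0 < d.length := by
          cases d with
          | nil => simp at hd
          | cons x xs => simp
        apply ih
        · simp only [List.length_drop]; omega
        · simp only [List.length_drop]; omega

-- the dp row of B lists A's count over all suffixes
lemma pvRowB_eq (pats : List (List Char)) (hp : [] ∉ pats) (d : List Char) :
    pvRowB pats d = d.tails.map (fun s => pvCountA pats (s.length + 1) s) := by
  induction d with
  | nil => simp [pvRowB, pvCountA]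
  | cons c rest ih =>
    simp only [pvRowB, List.tails, List.map_cons]
    refine congrArg₂ _ ?_ ih
    simp only [pvCountA, List.isEmpty_cons, if_false, Bool.false_eq_true]
    apply congrArg
    apply List.map_congr_left
    intro p hpmem
    rw [List.mem_filter] at hpmem
    obtain ⟨hpm, hsw⟩ := hpmem
    have hpre := (PySem.Chars.startswith_iff (c :: rest) p).mp hsw
    have hne : p ≠ [] := fun hz => hp (hz ▸ hpm)
    match p, hne with
    | q :: qs, _ =>
      have hl2 : qs.length + 1 ≤ rest.length + 1 := by
        have := hpre.length_le; simpa using this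
      have hq : qs.length < rest.tails.length := by
        simp only [List.length_tails]; omega
      rw [ih]
      simp only [List.length_cons, List.drop_succ_cons, List.getD_cons_succ]
      rw [List.getD_eq_getElem _ _ (by simpa using hq), List.getElem_map,
        List.getElem_tails]
      exact pvCountA_fuel pats hp _ _ _ (by simp only [List.length_drop]; omega)
        (by simp only [List.length_drop]; omega)

lemma pvHead_eq (pats : List (List Char)) (hp : [] ∉ pats) (d : List Char) :
    (pvRowB pats d).headI = pvCountA pats (d.length + 1) d := by
  rw [pvRowB_eq pats hp d]
  cases d <;> simp

lemma pvFold_eq (pats : List (List Char)) (hp : [] ∉ pats) (designs : List (List Char)) :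
    ∀ (a b : Int),
      designs.foldl
        (fun acc d =>
          let ways := (pvRowB pats d).headI
          (acc.1 + (if 0 < ways then 1 else 0), acc.2 + ways))
        (a, b)
      = (a + ((designs.countP (fun d => decide (0 < pvCountA pats (d.length + 1) d))) : Int),
         b + (designs.map (fun d => pvCountA pats (d.length + 1) d)).sum) := by
  induction designs with
  | nil => intro a b; simp
  | cons d t ih =>
    intro a b
    simp only [List.foldl_cons, List.countP_cons, List.map_cons, List.sum_cons]
    rw [ih, pvHead_eq pats hp d]
    simp only [Prod.mk.injEq, decide_eq_true_eq]
    constructor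
    · push_cast
      split_ifs <;> ring
    · ring

-- ===== VERDICT (by name: the statement is the Claim_ definition above) =====
theorem solve_spec : Claim_equal_solve := by
  intro data hdom hpre
  obtain ⟨hlen, himp⟩ := hpre
  match data, hlen with
  | d0 :: d1 :: r, _ =>
    unfold Spec_solve solve solve_alt
    have hg1 : PySem.List.pyGet? (d0 :: d1 :: r) 1 = some d1 := by
      simp [PySem.List.pyGet?, PySem.List.pyIdx?]
    rw [PySem.List.pyGet?_zero_cons, hg1]
    simp only []
    by_cases hps : [] ∈ PySem.Chars.splitOn d0.toList (", ".toList)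
    · have hd1 : PySem.Chars.split₀ d1.toList = [] := by
        apply himp; simpa using hps
      simp [hd1]
    · have hp : [] ∉ PySem.Set.ofList (PySem.Chars.splitOn d0.toList (", ".toList)) := by
        intro hmem
        exact hps (by simpa using ((PySem.Set.mem_ofList _ _).mp hmem))
      rw [pvFold_eq _ hp _ 0 0]
      simp
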